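-- pv_equiv track=rewrite | github.com/xrusnack/IV126-Fundamentals-of-AI | solver_template/destroy_logic.py | destroy_n_worst_cases
-- ===== SOURCE A (Python) =====
-- from typing import List, Tuple, Dict
--
-- def count_cost_after_destroy(del_indices: List[int], solution: List[int], solution_cost: int,
--                    distance_matrix: List[List[int]]) -> int:
--     """
--     This function incrementally calculates the updated cost of the solution after
--     the removal of the selected cities. Indices of the cities that are to be removed
--     are specified in the argument del_indices.
--
--     Returns: The updated solution cost after the specified cities have been removed.
--     Note: The solution is modified in-place (the cities are removed).
--     """
--
--     for i in sorted(del_indices, reverse=True):  # destroy a part of the solution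
--         curr = solution[i]
--         pred = solution[(i - 1) % len(solution)]
--         succ = solution[(i + 1) % len(solution)]
--
--         solution_cost -= distance_matrix[curr][pred]
--         solution_cost -= distance_matrix[curr][succ]
--         solution_cost += distance_matrix[pred][succ]
--
--         del solution[i]
--
--     return solution_cost
--
-- def destroy_n_worst_cases(solution: List[int], solution_cost: int, n: int,
--                               distance_matrix: List[List[int]]) -> Tuple[List[int], int]:
--     """
--     This function removes the specified number of cities based on the distance matrix.
--     The distance is calculated as a sum of distances to the two neighbours.
--
--     Returns: A tuple (list of destroyed cities, new solution cost).
--     Note: The solution is modified in-place (the cities are removed).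
--     """
--     assert n > 0
--
--     neighbor_lengths: Dict[int, int] = {}  # city index : sum of lengths to 2 neighbors
--
--     for i, city in enumerate(solution):
--         prev = (i - 1) % len(solution)
--         next = (i + 1) % len(solution)
--         neighbor_lengths[i] = distance_matrix[city][solution[prev]] + distance_matrix[city][solution[next]]
--
--     sorted_lengths = sorted(neighbor_lengths.items(), key=lambda item: item[1], reverse=True)
--     del_indices = [city_index for city_index, value in sorted_lengths[:n]]
--     del_cities = [solution[i] for i in del_indices]
--     new_cost = count_cost_after_destroy(del_indices, solution, solution_cost, distance_matrix)
--
--     return del_cities, new_cost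
-- ===== SOURCE B (Python) =====
-- from typing import List, Tuple
--
-- def destroy_n_worst_cases(solution: List[int], solution_cost: int, n: int,
--                           distance_matrix: List[List[int]]) -> Tuple[List[int], int]:
--     """Same selection of the n worst cities; the cost update is computed without
--     mutating the tour: the neighbours of each removed index are found by scanning
--     the ORIGINAL list while skipping an accumulated set of already-removed indices,
--     instead of repeatedly deleting from the list and re-indexing it.
--     (The in-place removal from `solution` is still performed, at the end.)"""
--     assert n > 0
--     L = len(solution)
--     pairs = [(i, distance_matrix[city][solution[(i - 1) % L]]
--                  + distance_matrix[city][solution[(i + 1) % L]])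
--              for i, city in enumerate(solution)]
--     order = sorted(pairs, key=lambda p: p[1], reverse=True)
--     del_indices = [i for i, _ in order[:n]]
--     del_cities = [solution[i] for i in del_indices]
--
--     cost = solution_cost
--     removed = set()
--     for i in sorted(del_indices, reverse=True):
--         curr = solution[i]
--         if i > 0:
--             pred = solution[i - 1]
--         else:
--             pred = next((solution[j] for j in range(L - 1, 0, -1) if j not in removed), solution[0])
--         succ = next((solution[j] for j in range(i + 1, L) if j not in removed), solution[0])
--         cost += distance_matrix[pred][succ] - distance_matrix[curr][pred] - distance_matrix[curr][succ]
--         removed.add(i)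
--     for i in sorted(del_indices, reverse=True):
--         del solution[i]
--     return del_cities, cost
-- ===== Notes on version B (the rewrite author's own statement) =====
-- stated objective: alternative
-- what changed: The incremental cost loop that repeatedly deletes from the solution list and re-indexes the shrinking list is replaced by a mutation-free loop that finds each removed index's current neighbours by scanning the original tour while skipping a growing set of already-removed indices; the worst-city selection is kept (built as a plain pair list instead of a dict).
import Mathlib
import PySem

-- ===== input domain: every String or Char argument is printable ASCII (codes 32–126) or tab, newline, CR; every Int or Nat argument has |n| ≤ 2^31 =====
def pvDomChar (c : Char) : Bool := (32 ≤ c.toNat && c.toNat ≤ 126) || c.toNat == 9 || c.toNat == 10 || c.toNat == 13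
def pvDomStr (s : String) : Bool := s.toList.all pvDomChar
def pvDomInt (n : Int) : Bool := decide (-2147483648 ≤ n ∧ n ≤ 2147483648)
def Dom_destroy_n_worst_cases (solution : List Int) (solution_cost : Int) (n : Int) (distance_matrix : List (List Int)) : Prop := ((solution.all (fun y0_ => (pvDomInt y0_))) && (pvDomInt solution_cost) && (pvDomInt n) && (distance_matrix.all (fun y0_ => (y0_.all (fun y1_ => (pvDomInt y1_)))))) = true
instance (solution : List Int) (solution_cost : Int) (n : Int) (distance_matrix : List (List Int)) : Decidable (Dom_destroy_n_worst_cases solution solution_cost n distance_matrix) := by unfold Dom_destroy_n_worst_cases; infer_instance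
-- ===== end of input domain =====

-- B replaces A's incremental delete-and-reindex cost loop by neighbour scans over the
-- ORIGINAL tour with a set of already-removed indices (objective: alternative, same cost).
-- Equivalence is about the RETURN value; Python A mutates `solution` in place (B performs
-- the same mutation at the end).

-- shared primitive wrappers: solution[i] and distance_matrix[a][b] (total via default;
-- exact wherever Pre_ holds, i.e. where Python does not raise IndexError)
def pvGetI (xs : List Int) (i : Int) : Int := PySem.List.pyGetD xs i 0
def pvM (dm : List (List Int)) (a b : Int) : Int := pvGetI (PySem.List.pyGetD dm a []) b

-- ===== PORT A =====
-- one iteration of the loop in count_cost_after_destroy (state = (solution, solution_cost))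
def pvCountStep (dm : List (List Int)) (st : List Int × Int) (i : Int) : List Int × Int :=
  let sol := st.1
  let curr := pvGetI sol i
  let pred := pvGetI sol (PySem.Int.mod (i - 1) (PySem.List.len sol))
  let succ := pvGetI sol (PySem.Int.mod (i + 1) (PySem.List.len sol))
  let cost := st.2 - pvM dm curr pred - pvM dm curr succ + pvM dm pred succ
  (((PySem.List.pop? sol i).map (fun r => r.2)).getD sol, cost)

def count_cost_after_destroy (del_indices : List Int) (solution : List Int)
    (solution_cost : Int) (distance_matrix : List (List Int)) : Int :=
  ((PySem.List.sorted del_indices (fun x => x) true).foldl (pvCountStep distance_matrix)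
    (solution, solution_cost)).2

def destroy_n_worst_cases (solution : List Int) (solution_cost : Int) (n : Int)
    (distance_matrix : List (List Int)) : List Int × Int :=
  let L := PySem.List.len solution
  let neighbor_lengths : PySem.Dict Int Int := (PySem.List.enumerate solution).foldl
    (fun d p => d.insert p.1
      (pvM distance_matrix p.2 (pvGetI solution (PySem.Int.mod (p.1 - 1) L))
       + pvM distance_matrix p.2 (pvGetI solution (PySem.Int.mod (p.1 + 1) L))))
    PySem.Dict.empty
  let sorted_lengths := PySem.List.sorted neighbor_lengths.items (fun it => it.2) true
  let del_indices := (PySem.List.slice sorted_lengths none (some n)).map (fun it => it.1)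
  let del_cities := del_indices.map (fun i => pvGetI solution i)
  (del_cities, count_cost_after_destroy del_indices solution solution_cost distance_matrix)

-- ===== PORT B =====
-- next(…) scans over range(a, b) / range(L-1, 0, -1) skipping removed indices
def pvNextAlive (solution : List Int) (removed : PySem.Set Int) (a b : Int) : Int :=
  match (PySem.List.pyRange a b 1).find? (fun j => !(PySem.Set.contains removed j)) with
  | some j => pvGetI solution j
  | none => pvGetI solution 0

def pvPrevAlive (solution : List Int) (removed : PySem.Set Int) (L : Int) : Int :=
  match (PySem.List.pyRange (L - 1) 0 (-1)).find? (fun j => !(PySem.Set.contains removed j)) with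
  | some j => pvGetI solution j
  | none => pvGetI solution 0

-- one iteration of B's cost loop (state = (removed, cost); no list mutation)
def pvAltStep (solution : List Int) (dm : List (List Int)) (L : Int)
    (st : PySem.Set Int × Int) (i : Int) : PySem.Set Int × Int :=
  let curr := pvGetI solution i
  let pred := if 0 < i then pvGetI solution (i - 1) else pvPrevAlive solution st.1 L
  let succ := pvNextAlive solution st.1 (i + 1) L
  (PySem.Set.add st.1 i, st.2 + (pvM dm pred succ - pvM dm curr pred - pvM dm curr succ))

def destroy_n_worst_cases_alt (solution : List Int) (solution_cost : Int) (n : Int)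
    (distance_matrix : List (List Int)) : List Int × Int :=
  let L := PySem.List.len solution
  let pairs := (PySem.List.enumerate solution).map
    (fun p => (p.1,
      pvM distance_matrix p.2 (pvGetI solution (PySem.Int.mod (p.1 - 1) L))
      + pvM distance_matrix p.2 (pvGetI solution (PySem.Int.mod (p.1 + 1) L))))
  let order := PySem.List.sorted pairs (fun it => it.2) true
  let del_indices := (PySem.List.slice order none (some n)).map (fun it => it.1)
  let del_cities := del_indices.map (fun i => pvGetI solution i)
  let cost := ((PySem.List.sorted del_indices (fun x => x) true).foldl
    (pvAltStep solution distance_matrix L) (PySem.Set.empty, solution_cost)).2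
  (del_cities, cost)

-- ===== PRECONDITION & SPEC =====
-- Pre_ = A returns normally: n > 0 (the assert) and every pair of cities of the tour is a
-- valid (possibly negative, Python-style) index pair into distance_matrix, so no access can
-- raise IndexError. This slightly narrows A's domain: A can also return on ragged matrices
-- where some never-accessed pair of cities is out of range; B returns the same value there.
def Pre_destroy_n_worst_cases (solution : List Int) (solution_cost : Int) (n : Int)
    (distance_matrix : List (List Int)) : Prop :=
  0 < n ∧ ∀ c ∈ solution, PySem.Raise.InRange distance_matrix.length c ∧
    ∀ c' ∈ solution, PySem.Raise.InRange (PySem.List.pyGetD distance_matrix c []).length c'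
instance (solution : List Int) (solution_cost : Int) (n : Int) (distance_matrix : List (List Int)) : Decidable (Pre_destroy_n_worst_cases solution solution_cost n distance_matrix) := by unfold Pre_destroy_n_worst_cases; infer_instance

def pvWitness_destroy_n_worst_cases : List Int × Int × Int × List (List Int) :=
  ([0, 1, 2], 30, 1, [[0, 10, 4], [10, 0, 16], [4, 16, 0]])

def Spec_destroy_n_worst_cases (solution : List Int) (solution_cost : Int) (n : Int) (distance_matrix : List (List Int)) (out : List Int × Int) : Prop := out = destroy_n_worst_cases_alt solution solution_cost n distance_matrix
instance (solution : List Int) (solution_cost : Int) (n : Int) (distance_matrix : List (List Int)) (out : List Int × Int) : Decidable (Spec_destroy_n_worst_cases solution solution_cost n distance_matrix out) := by unfold Spec_destroy_n_worst_cases; infer_instance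

-- ===== CLAIM (what is proved, stated in full; the proofs are below) =====
def Claim_equal_destroy_n_worst_cases : Prop := ∀ (solution : List Int) (solution_cost : Int) (n : Int) (distance_matrix : List (List Int)), Dom_destroy_n_worst_cases solution solution_cost n distance_matrix → Pre_destroy_n_worst_cases solution solution_cost n distance_matrix → Spec_destroy_n_worst_cases solution solution_cost n distance_matrix (destroy_n_worst_cases solution solution_cost n distance_matrix)

-- ===== LEMMAS AND PROOFS =====

-- A's current solution list after the indices of R have been deleted, expressed over the
-- ORIGINAL list: the surviving original positions (in order), mapped to their cities.
def pvSurv (A : List Int) (R : List Int) : List Int :=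
  ((List.range A.length).filter (fun (j : Nat) => !(R.contains ((j : Int))))).map
    (fun (j : Nat) => A.getD j 0)

def pvP (R : List Int) : Nat → Bool := fun j => !(R.contains ((j : Int)))
def pvG (A : List Int) : Nat → Int := fun j => A.getD j 0
def pvAsc (A : List Int) (m : Nat) : List Nat := (List.range (A.length - (m+1))).map ((m+1) + ·)
def pvTail (A R : List Int) (m : Nat) : List Nat := (pvAsc A m).filter (pvP R)

lemma pvSurv_def' (A R : List Int) :
    pvSurv A R = ((List.range A.length).filter (pvP R)).map (pvG A) := rfl

lemma pvSurv_nil (A : List Int) : pvSurv A [] = A := by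
  unfold pvSurv
  simp [List.filter_true]
  apply List.ext_getElem
  · simp
  · intro i h1 h2
    simp [List.getElem?_eq_getElem h2]

lemma pvSurv_split (A R : List Int) (dn : Nat) (hdn : dn < A.length)
    (hfront : ∀ j ≤ dn, pvP R j = true) :
    pvSurv A R = (List.range (dn+1)).map (pvG A) ++ (pvTail A R dn).map (pvG A) := by
  rw [pvSurv_def']
  unfold pvTail pvAsc
  have h1 : A.length = (dn+1) + (A.length - (dn+1)) := by omega
  rw [show List.range A.length = List.range ((dn+1) + (A.length - (dn+1))) from by rw [← h1]]
  rw [List.range_add, List.filter_append, List.map_append]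
  congr 2
  apply List.filter_eq_self.mpr
  intro j hj
  exact hfront j (Nat.lt_succ_iff.mp (List.mem_range.mp hj))

lemma pvNextAlive_eq (A R : List Int) (dn : Nat) (hdn : dn < A.length) :
    pvNextAlive A R ((dn : Int) + 1) (PySem.List.len A) =
      (match (pvTail A R dn).head? with
       | some j => pvG A j
       | none => pvG A 0) := by
  unfold pvNextAlive
  have h1 : PySem.List.pyRange ((dn : Int) + 1) (PySem.List.len A) 1
      = (pvAsc A dn).map (fun (k : Nat) => (k : Int)) := by
    rw [PySem.List.pyRange_one]
    unfold pvAsc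
    rw [List.map_map]
    have h2 : (PySem.List.len A - ((dn : Int) + 1)).toNat = A.length - (dn + 1) := by
      simp [PySem.List.len_eq]; omega
    rw [h2]
    apply List.map_congr_left
    intro k _
    simp
  rw [h1, List.find?_map]
  have h3 : ((fun j => !PySem.Set.contains R j) ∘ (fun (k : Nat) => (k : Int))) = pvP R := by
    funext j; simp [pvP, PySem.Set.contains_eq_listContains]
  rw [h3, ← List.head?_filter]
  show _ = (match (pvTail A R dn).head? with | some j => pvG A j | none => pvG A 0)
  unfold pvTail
  cases h : ((pvAsc A dn).filter (pvP R)).head? with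
  | none => simp [pvGetI, PySem.List.pyGetD_zero, pvG]
  | some j => simp [pvGetI, pvG, PySem.List.pyGetD_natCast]

lemma pvPrevAlive_eq (A R : List Int) (hL : 0 < A.length) :
    pvPrevAlive A R (PySem.List.len A) =
      (match (pvTail A R 0).getLast? with
       | some j => pvG A j
       | none => pvG A 0) := by
  unfold pvPrevAlive
  have h1 : PySem.List.pyRange (PySem.List.len A - 1) 0 (-1)
      = ((pvAsc A 0).map (fun (k : Nat) => (k : Int))).reverse := by
    rw [PySem.List.pyRange_neg_one]
    unfold pvAsc
    apply List.ext_getElem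
    · simp [PySem.List.len_eq]
    · intro i hi1 hi2
      rw [List.getElem_reverse]
      simp [PySem.List.len_eq] at hi1 hi2 ⊢
      omega
  rw [h1]
  have h3 : (fun (j : Int) => !PySem.Set.contains R j) = (fun j => !R.contains j) := by
    funext j; simp [PySem.Set.contains_eq_listContains]
  rw [h3, ← List.head?_filter, List.filter_reverse, List.head?_reverse, List.filter_map]
  have h4 : ((fun (j : Int) => !R.contains j) ∘ (fun (k : Nat) => (k : Int))) = pvP R := by
    funext j; simp [pvP]
  rw [h4, List.getLast?_map]
  unfold pvTail
  cases h : ((pvAsc A 0).filter (pvP R)).getLast? with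
  | none => simp [pvGetI, PySem.List.pyGetD_zero, pvG]
  | some j => simp [pvGetI, pvG, PySem.List.pyGetD_natCast]

lemma getD_append_map_range (A : List Int) (m k : Nat) (tl : List Nat) (hk : k < m) :
    ((List.range m).map (pvG A) ++ tl.map (pvG A)).getD k 0 = pvG A k := by
  rw [List.getD_eq_getElem?_getD, List.getElem?_append_left (by simp [hk]),
    List.getElem?_map, List.getElem?_range hk]
  rfl

lemma getD_append_map_range_right (A : List Int) (m : Nat) (tl : List Nat) (k : Nat)
    (hk : m ≤ k) :
    ((List.range m).map (pvG A) ++ tl.map (pvG A)).getD k 0 = (tl.map (pvG A)).getD (k - m) 0 := by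
  rw [List.getD_eq_getElem?_getD, List.getElem?_append_right (by simp [hk]),
    List.getD_eq_getElem?_getD]
  simp

lemma getD_map_last (A : List Int) (tl : List Nat) (h : tl ≠ []) :
    (tl.map (pvG A)).getD (tl.length - 1) 0
      = (match tl.getLast? with | some j => pvG A j | none => pvG A 0) := by
  rw [List.getD_eq_getElem?_getD, List.getElem?_map, ← List.getLast?_eq_getElem?]
  cases htl : tl.getLast? with
  | none => exact absurd (List.getLast?_eq_none_iff.mp htl) h
  | some j => rfl

lemma pvSurv_erase (A R : List Int) (d : Int)
    (hd0 : 0 ≤ d) (hdL : d < (A.length : Int))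
    (hR : ∀ r ∈ R, d < r ∧ r < (A.length : Int)) :
    (pvSurv A R).eraseIdx d.toNat = pvSurv A (R ++ [d]) := by
  have hdn : d.toNat < A.length := by omega
  have hd : d = (d.toNat : Int) := by omega
  set dn := d.toNat with hdndef
  have hfront : ∀ j ≤ dn, pvP R j = true := by
    intro j hj
    have hnm : ((j : Int)) ∉ R := by
      intro hmem; have := hR _ hmem; omega
    simp [pvP, hnm]
  rw [pvSurv_split A R dn hdn hfront,
    List.eraseIdx_append_of_lt_length (by simp)]
  have hfr : ((List.range (dn+1)).map (pvG A)).eraseIdx dn = (List.range dn).map (pvG A) := by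
    rw [List.eraseIdx_eq_take_drop_succ, List.drop_eq_nil_of_le (by simp),
      ← List.map_take, List.take_range]
    simp
  rw [hfr]
  rw [pvSurv_def']
  have h1 : A.length = (dn+1) + (A.length - (dn+1)) := by omega
  rw [show List.range A.length = List.range ((dn+1) + (A.length - (dn+1))) from by rw [← h1]]
  rw [List.range_add, List.filter_append, List.map_append]
  have hfr2 : (List.range (dn+1)).filter (pvP (R ++ [d])) = List.range dn := by
    rw [List.range_succ, List.filter_append]
    have hA : (List.range dn).filter (pvP (R ++ [d])) = List.range dn := by
      apply List.filter_eq_self.mpr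
      intro j hj
      have hjlt : j < dn := List.mem_range.mp hj
      have h1 : ((j : Int)) ∉ R := by
        intro hmem; have := hR _ hmem; omega
      have h2 : ¬ ((j : Int)) = d := by omega
      simp [pvP, h1, h2]
    have hB : [dn].filter (pvP (R ++ [d])) = [] := by
      have h2 : ((dn : Int)) = d := hd.symm
      simp [pvP, h2]
    rw [hA, hB, List.append_nil]
  rw [hfr2]
  have htl2 : ((List.range (A.length - (dn+1))).map ((dn+1) + ·)).filter (pvP (R ++ [d]))
      = pvTail A R dn := by
    unfold pvTail pvAsc
    apply List.filter_congr
    intro j hj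
    have hjge : dn + 1 ≤ j := by
      rcases List.mem_map.mp hj with ⟨k, _, hk⟩
      omega
    have hne : ¬ ((j : Int)) = d := by omega
    simp [pvP, hne]
  rw [htl2]

lemma pvStep_eq (A : List Int) (dm : List (List Int)) (R : List Int) (cost d : Int)
    (hd0 : 0 ≤ d) (hdL : d < (A.length : Int))
    (hR : ∀ r ∈ R, d < r ∧ r < (A.length : Int)) :
    pvCountStep dm (pvSurv A R, cost) d
      = (pvSurv A (R ++ [d]), (pvAltStep A dm (PySem.List.len A) (R, cost) d).2) := by
  have hdn : d.toNat < A.length := by omega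
  have hd : d = (d.toNat : Int) := by omega
  set dn := d.toNat with hdndef
  have hfront : ∀ j ≤ dn, pvP R j = true := by
    intro j hj
    have hnm : ((j : Int)) ∉ R := by
      intro hmem; have := hR _ hmem; omega
    simp [pvP, hnm]
  have hsplit := pvSurv_split A R dn hdn hfront
  set tl := pvTail A R dn with htldef
  have hSlen : (pvSurv A R).length = dn + 1 + tl.length := by
    rw [hsplit]; simp
  have hlenS : PySem.List.len (pvSurv A R) = ((dn + 1 + tl.length : Nat) : Int) := by
    simp [PySem.List.len_eq, hSlen]
  -- current city
  have hcurr : pvGetI (pvSurv A R) d = pvG A dn := by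
    rw [hd]
    unfold pvGetI
    rw [PySem.List.pyGetD_natCast, hsplit, getD_append_map_range A (dn+1) dn tl (by omega)]
  have hcurrB : pvGetI A d = pvG A dn := by
    rw [hd]; unfold pvGetI pvG
    rw [PySem.List.pyGetD_natCast]
  -- predecessor
  have hpredAB : pvGetI (pvSurv A R) (PySem.Int.mod (d - 1) (PySem.List.len (pvSurv A R)))
      = (if 0 < d then pvGetI A (d - 1) else pvPrevAlive A R (PySem.List.len A)) := by
    by_cases hpos : 0 < d
    · rw [if_pos hpos, hlenS]
      have hmod : PySem.Int.mod (d - 1) ((dn + 1 + tl.length : Nat) : Int) = d - 1 := by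
        rw [PySem.Int.mod_eq_emod_of_pos (by omega)]
        exact Int.emod_eq_of_lt (by omega) (by omega)
      rw [hmod, show d - 1 = ((dn - 1 : Nat) : Int) from by omega]
      unfold pvGetI
      rw [PySem.List.pyGetD_natCast, PySem.List.pyGetD_natCast, hsplit,
        getD_append_map_range A (dn+1) (dn-1) tl (by omega)]
      rfl
    · have hdz : d = 0 := by omega
      have hdnz : dn = 0 := by omega
      rw [if_neg hpos, hlenS]
      have hmod : PySem.Int.mod (d - 1) ((dn + 1 + tl.length : Nat) : Int)
          = ((tl.length : Nat) : Int) := by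
        rw [PySem.Int.mod_eq_emod_of_pos (by omega),
          show d - 1 = ((tl.length : Nat) : Int) - ((dn + 1 + tl.length : Nat) : Int) from by omega,
          Int.sub_emod_right]
        exact Int.emod_eq_of_lt (by omega) (by omega)
      rw [hmod, pvPrevAlive_eq A R (by omega)]
      unfold pvGetI
      rw [PySem.List.pyGetD_natCast, hsplit]
      rw [show pvTail A R 0 = tl from by rw [htldef, hdnz]]
      cases htl : tl with
      | nil =>
        simp only [List.length_nil]
        rw [getD_append_map_range A (dn+1) 0 [] (by omega)]
        rfl
      | cons a t =>
        rw [getD_append_map_range_right A (dn+1) (a :: t) (a :: t).length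
          (by simp [hdnz])]
        rw [show (a :: t).length - (dn+1) = (a :: t).length - 1 from by simp [hdnz]]
        rw [getD_map_last A (a :: t) (by simp)]
  -- successor
  have hsuccAB : pvGetI (pvSurv A R) (PySem.Int.mod (d + 1) (PySem.List.len (pvSurv A R)))
      = pvNextAlive A R (d + 1) (PySem.List.len A) := by
    rw [show (d : Int) + 1 = ((dn : Nat) : Int) + 1 from by omega, pvNextAlive_eq A R dn hdn,
      hlenS]
    rw [show pvTail A R dn = tl from rfl]
    cases htl : tl with
    | nil =>
      simp only [List.length_nil, List.head?_nil]
      have hmod : PySem.Int.mod (((dn : Nat) : Int) + 1) ((dn + 1 + 0 : Nat) : Int) = 0 := by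
        rw [PySem.Int.mod_eq_emod_of_pos (by omega),
          show ((dn : Nat) : Int) + 1 = ((dn + 1 + 0 : Nat) : Int) from by push_cast; ring]
        exact Int.emod_self
      rw [hmod]
      unfold pvGetI
      rw [PySem.List.pyGetD_zero, hsplit, htl]
      rw [show ((List.range (dn+1)).map (pvG A) ++ ([] : List Nat).map (pvG A)).getD 0 0
          = pvG A 0 from getD_append_map_range A (dn+1) 0 [] (by omega)]
    | cons a t =>
      have hmod : PySem.Int.mod (((dn : Nat) : Int) + 1) ((dn + 1 + (a :: t).length : Nat) : Int)
          = ((dn + 1 : Nat) : Int) := by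
        rw [PySem.Int.mod_eq_emod_of_pos (by omega)]
        exact Int.emod_eq_of_lt (by omega) (by simp)
      rw [hmod]
      unfold pvGetI
      rw [PySem.List.pyGetD_natCast, hsplit, htl,
        getD_append_map_range_right A (dn+1) (a :: t) (dn+1) (by omega)]
      simp
  -- deletion
  have hpop : ((PySem.List.pop? (pvSurv A R) d).map (fun r => r.2)).getD (pvSurv A R)
      = pvSurv A (R ++ [d]) := by
    rw [hd, PySem.List.pop?_natCast (pvSurv A R) dn (by omega)]
    simp only [Option.map_some, Option.getD_some]
    rw [← hd]
    exact pvSurv_erase A R d hd0 hdL hR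
  -- assemble
  unfold pvCountStep pvAltStep
  refine Prod.ext ?_ ?_
  · simpa using hpop
  · simp only []
    rw [hcurr, hcurrB, hpredAB, hsuccAB]
    ring

lemma pvAltStep_fst (A : List Int) (dm : List (List Int)) (L : Int) (R : List Int)
    (cost d : Int) (hd : d ∉ R) :
    (pvAltStep A dm L (R, cost) d).1 = R ++ [d] := by
  simp [pvAltStep, PySem.Set.add_of_not_mem hd]

lemma pvCost_fold_eq (A : List Int) (dm : List (List Int)) :
    ∀ (dels R : List Int) (cost : Int),
    dels.Pairwise (fun a b => b < a) →
    (∀ d ∈ dels, 0 ≤ d ∧ d < (A.length : Int)) →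
    (∀ d ∈ dels, ∀ r ∈ R, d < r) →
    (∀ r ∈ R, r < (A.length : Int)) →
    (dels.foldl (pvCountStep dm) (pvSurv A R, cost)).2
      = (dels.foldl (pvAltStep A dm (PySem.List.len A)) (R, cost)).2 := by
  intro dels
  induction dels with
  | nil => intro R cost _ _ _ _; rfl
  | cons d rest ih =>
    intro R cost hpw hbound hlt hRL
    simp only [List.foldl_cons]
    have hd0 := (hbound d (by simp)).1
    have hdL := (hbound d (by simp)).2
    have hR' : ∀ r ∈ R, d < r ∧ r < (A.length : Int) := fun r hr =>
      ⟨hlt d (by simp) r hr, hRL r hr⟩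
    rw [pvStep_eq A dm R cost d hd0 hdL hR']
    have hdnotin : d ∉ R := fun h => by have := hR' d h; omega
    have hstate : pvAltStep A dm (PySem.List.len A) (R, cost) d
        = (R ++ [d], (pvAltStep A dm (PySem.List.len A) (R, cost) d).2) := by
      rw [show pvAltStep A dm (PySem.List.len A) (R, cost) d
          = ((pvAltStep A dm (PySem.List.len A) (R, cost) d).1,
             (pvAltStep A dm (PySem.List.len A) (R, cost) d).2) from rfl,
        pvAltStep_fst A dm (PySem.List.len A) R cost d hdnotin]
    rw [hstate]
    have hhead : ∀ b ∈ rest, b < d := (List.pairwise_cons.mp hpw).1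
    apply ih (R ++ [d]) _ (List.pairwise_cons.mp hpw).2
    · exact fun d' h => hbound d' (List.mem_cons_of_mem _ h)
    · intro d' hd' r hr
      rcases List.mem_append.mp hr with hr | hr
      · exact lt_trans (hhead d' hd') (hlt d (by simp) r hr)
      · have : r = d := by simpa using hr
        rw [this]; exact hhead d' hd'
    · intro r hr
      rcases List.mem_append.mp hr with hr | hr
      · exact hRL r hr
      · have : r = d := by simpa using hr
        rw [this]; exact hdL

lemma pvFinal_cost (sol : List Int) (dm : List (List Int)) (cost : Int) (di : List Int)
    (hnd : di.Nodup) (hbd : ∀ x ∈ di, 0 ≤ x ∧ x < (sol.length : Int)) :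
    ((PySem.List.sorted di (fun x => x) true).foldl (pvCountStep dm) (sol, cost)).2
      = ((PySem.List.sorted di (fun x => x) true).foldl
          (pvAltStep sol dm (PySem.List.len sol)) (PySem.Set.empty, cost)).2 := by
  have hperm := PySem.List.sorted_perm di (fun x => x) true
  have hpw : (PySem.List.sorted di (fun x => x) true).Pairwise (fun a b => b < a) := by
    have h1 := PySem.List.sorted_pairwise_rev di (fun x => x)
    have h2 : (PySem.List.sorted di (fun x => x) true).Nodup := hperm.nodup_iff.mpr hnd
    exact (h1.and h2).imp (by intro a b h; omega)
  have hbd' : ∀ x ∈ PySem.List.sorted di (fun x => x) true, 0 ≤ x ∧ x < (sol.length : Int) :=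
    fun x hx => hbd x ((PySem.List.mem_sorted di (fun x => x) true x).mp hx)
  conv_lhs => rw [← pvSurv_nil sol]
  exact pvCost_fold_eq sol dm (PySem.List.sorted di (fun x => x) true) [] cost hpw hbd'
    (by simp) (by simp)

lemma pvDi_nodup (pairs : List (Int × Int)) (n : Int)
    (hnd : (pairs.map (fun p => p.1)).Nodup) :
    (((PySem.List.slice (PySem.List.sorted pairs (fun it => it.2) true) none (some n)).map
      (fun it => it.1))).Nodup := by
  have hperm := (PySem.List.sorted_perm pairs (fun it => it.2) true).map (fun p => p.1)
  have h1 : ((PySem.List.sorted pairs (fun it => it.2) true).map (fun p => p.1)).Nodup :=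
    hperm.nodup_iff.mpr hnd
  rw [show PySem.List.slice (PySem.List.sorted pairs (fun it => it.2) true) none (some n)
      = (PySem.List.sorted pairs (fun it => it.2) true).take
          (PySem.List.clampIdx (PySem.List.sorted pairs (fun it => it.2) true).length n) from by
    simp [PySem.List.slice]]
  rw [List.map_take]
  exact (List.take_sublist _ _).nodup h1

lemma pvDi_bounds (sol : List Int) (W : Int × Int → Int) (n : Int) (x : Int)
    (hx : x ∈ (PySem.List.slice
      (PySem.List.sorted ((PySem.List.enumerate sol).map (fun p => (p.1, W p)))
        (fun it => it.2) true) none (some n)).map (fun it => it.1)) :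
    0 ≤ x ∧ x < (sol.length : Int) := by
  rcases List.mem_map.mp hx with ⟨it, hit, rfl⟩
  have hit2 := PySem.List.mem_of_mem_slice _ _ _ hit
  have hit3 := (PySem.List.mem_sorted _ _ _ _).mp hit2
  rcases List.mem_map.mp hit3 with ⟨p, hp, rfl⟩
  rcases (PySem.List.mem_enumerate_iff sol 0 p).mp hp with ⟨k, hk, rfl⟩
  simp
  omega

lemma pvEnumFst_nodup (sol : List Int) :
    ((PySem.List.enumerate sol).map (fun (p : Int × Int) => p.1)).Nodup := by
  rw [PySem.List.map_fst_enumerate]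
  exact PySem.List.nodup_pyRange_one 0 _

lemma pvEnum_fst_nodup (sol : List Int) (W : Int × Int → Int) :
    (((PySem.List.enumerate sol).map (fun p => (p.1, W p))).map (fun p => p.1)).Nodup := by
  rw [List.map_map]
  have h1 : ((fun (p : Int × Int) => p.1) ∘ (fun (p : Int × Int) => (p.1, W p)))
      = (fun (p : Int × Int) => p.1) := rfl
  rw [h1, PySem.List.map_fst_enumerate]
  exact PySem.List.nodup_pyRange_one 0 _

theorem destroy_n_worst_cases_spec_aux :
    ∀ (solution : List Int) (solution_cost : Int) (n : Int) (dm : List (List Int)),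
    destroy_n_worst_cases solution solution_cost n dm
      = destroy_n_worst_cases_alt solution solution_cost n dm := by
  intro sol cost n dm
  unfold destroy_n_worst_cases destroy_n_worst_cases_alt count_cost_after_destroy
  simp only []
  rw [PySem.Dict.items_foldl_insert_fresh (PySem.List.enumerate sol)
    (fun p => p.1)
    (fun p => pvM dm p.2 (pvGetI sol (PySem.Int.mod (p.1 - 1) (PySem.List.len sol)))
      + pvM dm p.2 (pvGetI sol (PySem.Int.mod (p.1 + 1) (PySem.List.len sol))))
    PySem.Dict.empty (fun a _ => rfl)
    (pvEnumFst_nodup sol)]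
  rw [show (PySem.Dict.empty : PySem.Dict Int Int).items = [] from rfl, List.nil_append]
  refine Prod.ext rfl ?_
  simp only []
  exact pvFinal_cost sol dm cost _
    (pvDi_nodup _ n (pvEnum_fst_nodup sol _))
    (fun x hx => pvDi_bounds sol _ n x hx)

-- ===== VERDICT (by name: the statement is the Claim_ definition above) =====
theorem destroy_n_worst_cases_spec : Claim_equal_destroy_n_worst_cases := by
  intro solution solution_cost n dm _ _
  unfold Spec_destroy_n_worst_cases
  exact destroy_n_worst_cases_spec_aux solution solution_cost n dm
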